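-- pv_equiv track=rewrite | github.com/EntornosSergio/EntornoServidor | PYTHON/EXAMENES/SergioLuis/Funciones.py | jugador_ganador
-- ===== SOURCE A (Python) =====
-- def jugador_ganador(lista):
--     max_puntaje = 0
--     ganadores = []
--
--     for jugador in lista:
--         if jugador[1] > max_puntaje:
--             max_puntaje = jugador[1]
--
--     for jugador in lista:
--         if jugador[1] == max_puntaje:
--             ganadores.append(jugador)
--     return ganadores
-- ===== SOURCE B (Python) =====
-- def jugador_ganador(lista):
--     # single pass: running max (floored at 0, like A's init) with reset-on-new-max
--     max_puntaje = 0
--     ganadores = []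
--     for jugador in lista:
--         if jugador[1] > max_puntaje:
--             max_puntaje = jugador[1]
--             ganadores = [jugador]
--         elif jugador[1] == max_puntaje:
--             ganadores.append(jugador)
--     return ganadores
-- ===== Notes on version B (the rewrite author's own statement) =====
-- stated objective: alternative
-- what changed: Replaces A's two sequential passes (find max, then filter) by one pass maintaining the running maximum and the current winners list, resetting the list whenever a new maximum appears.
import Mathlib
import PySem

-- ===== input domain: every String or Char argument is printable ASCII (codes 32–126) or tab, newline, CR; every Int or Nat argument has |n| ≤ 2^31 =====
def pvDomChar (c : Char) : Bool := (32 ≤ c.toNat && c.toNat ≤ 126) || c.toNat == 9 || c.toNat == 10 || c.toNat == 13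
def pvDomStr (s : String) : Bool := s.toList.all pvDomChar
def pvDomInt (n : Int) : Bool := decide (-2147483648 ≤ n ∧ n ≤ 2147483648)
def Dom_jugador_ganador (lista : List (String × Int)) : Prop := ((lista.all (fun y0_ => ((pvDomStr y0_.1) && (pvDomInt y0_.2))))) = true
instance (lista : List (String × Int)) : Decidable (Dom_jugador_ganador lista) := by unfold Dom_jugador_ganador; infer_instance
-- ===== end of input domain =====

-- B replaces A's two passes (find max, then filter) by one pass that resets the winners list on a new maximum; same return value, no speed claim.

-- ===== PORT A =====
-- first loop: running maximum starting at 0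
def jgMax (lista : List (String × Int)) : Int :=
  lista.foldl (fun m j => if j.2 > m then j.2 else m) 0

-- second loop: append each player whose score equals the maximum
def jugador_ganador (lista : List (String × Int)) : List (String × Int) :=
  let m := jgMax lista
  lista.foldl (fun g j => if j.2 = m then g ++ [j] else g) []

-- ===== PORT B =====
-- single pass: state (max_puntaje, ganadores); reset on a strictly larger score, append on equality
def jugador_ganador_alt (lista : List (String × Int)) : List (String × Int) :=
  (lista.foldl
    (fun st j =>
      if j.2 > st.1 then (j.2, [j])
      else if j.2 = st.1 then (st.1, st.2 ++ [j])
      else st)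
    ((0 : Int), ([] : List (String × Int)))).2

-- ===== PRECONDITION & SPEC =====
def Spec_jugador_ganador (lista : List (String × Int)) (out : List (String × Int)) : Prop := out = jugador_ganador_alt lista
instance (lista : List (String × Int)) (out : List (String × Int)) : Decidable (Spec_jugador_ganador lista out) := by unfold Spec_jugador_ganador; infer_instance

-- ===== CLAIM (what is proved, stated in full; the proofs are below) =====
def Claim_equal_jugador_ganador : Prop := ∀ (lista : List (String × Int)), Dom_jugador_ganador lista → Spec_jugador_ganador lista (jugador_ganador lista)

-- ===== LEMMAS AND PROOFS =====

-- running maximum over l starting from m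
def jgMaxFrom (m : Int) (l : List (String × Int)) : Int :=
  l.foldl (fun a j => if j.2 > a then j.2 else a) m

theorem le_jgMaxFrom (m : Int) (l : List (String × Int)) : m ≤ jgMaxFrom m l := by
  induction l generalizing m with
  | nil => simp [jgMaxFrom]
  | cons j l ih =>
    simp only [jgMaxFrom, List.foldl_cons]
    split_ifs with h
    · exact le_trans (le_of_lt h) (ih j.2)
    · exact ih m

-- invariant of B's single-pass fold
theorem foldB_eq (l : List (String × Int)) (m : Int) (g : List (String × Int)) :
    l.foldl
      (fun st j =>
        if j.2 > st.1 then (j.2, [j])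
        else if j.2 = st.1 then (st.1, st.2 ++ [j])
        else st)
      (m, g)
    = (jgMaxFrom m l,
       (if jgMaxFrom m l = m then g else []) ++ l.filter (fun j => j.2 = jgMaxFrom m l)) := by
  induction l generalizing m g with
  | nil => simp [jgMaxFrom]
  | cons j l ih =>
    by_cases h1 : j.2 > m
    · have hs : (j :: l).foldl
          (fun st j =>
            if j.2 > st.1 then (j.2, [j])
            else if j.2 = st.1 then (st.1, st.2 ++ [j])
            else st) (m, g)
          = l.foldl
          (fun st j =>
            if j.2 > st.1 then (j.2, [j])
            else if j.2 = st.1 then (st.1, st.2 ++ [j])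
            else st) (j.2, [j]) := by simp [h1]
      have hM' : jgMaxFrom m (j :: l) = jgMaxFrom j.2 l := by simp [jgMaxFrom, h1]
      have hne : jgMaxFrom j.2 l ≠ m := ne_of_gt (lt_of_lt_of_le h1 (le_jgMaxFrom _ _))
      rw [hs, ih, hM']
      by_cases hje : jgMaxFrom j.2 l = j.2
      · simp [hje]
        exact fun c => absurd c (ne_of_gt h1)
      · have hj : ¬ j.2 = jgMaxFrom j.2 l := fun c => hje (Eq.symm c)
        simp [hne, hj]
        exact hje
    · by_cases h2 : j.2 = m
      · have hs : (j :: l).foldl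
            (fun st j =>
              if j.2 > st.1 then (j.2, [j])
              else if j.2 = st.1 then (st.1, st.2 ++ [j])
              else st) (m, g)
            = l.foldl
            (fun st j =>
              if j.2 > st.1 then (j.2, [j])
              else if j.2 = st.1 then (st.1, st.2 ++ [j])
              else st) (m, g ++ [j]) := by simp [h2]
        have hM' : jgMaxFrom m (j :: l) = jgMaxFrom m l := by simp [jgMaxFrom, h1]
        rw [hs, ih, hM']
        by_cases he : jgMaxFrom m l = m
        · have hj : j.2 = jgMaxFrom m l := by rw [he, h2]
          simp [he, hj]
        · have hj : ¬ j.2 = jgMaxFrom m l := by rw [h2]; exact fun c => he (Eq.symm c)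
          simp [he, hj]
      · have hs : (j :: l).foldl
            (fun st j =>
              if j.2 > st.1 then (j.2, [j])
              else if j.2 = st.1 then (st.1, st.2 ++ [j])
              else st) (m, g)
            = l.foldl
            (fun st j =>
              if j.2 > st.1 then (j.2, [j])
              else if j.2 = st.1 then (st.1, st.2 ++ [j])
              else st) (m, g) := by simp [h1, h2]
        have hM' : jgMaxFrom m (j :: l) = jgMaxFrom m l := by simp [jgMaxFrom, h1]
        have hlt : j.2 < m := lt_of_le_of_ne (not_lt.mp h1) h2
        have hj : ¬ j.2 = jgMaxFrom m l :=
          ne_of_lt (lt_of_lt_of_le hlt (le_jgMaxFrom _ _))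
        rw [hs, ih, hM']
        simp [hj]

-- A's second loop is a filter
theorem foldA_eq (l : List (String × Int)) (m : Int) (acc : List (String × Int)) :
    l.foldl (fun g j => if j.2 = m then g ++ [j] else g) acc
      = acc ++ l.filter (fun j => j.2 = m) := by
  induction l generalizing acc with
  | nil => simp
  | cons j l ih =>
    by_cases hj : j.2 = m <;> simp [hj, ih]

-- ===== VERDICT (by name: the statement is the Claim_ definition above) =====
theorem jugador_ganador_spec : Claim_equal_jugador_ganador := by
  intro lista _
  show jugador_ganador lista = jugador_ganador_alt lista
  rw [jugador_ganador, jugador_ganador_alt, foldB_eq, foldA_eq]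
  have h : jgMax lista = jgMaxFrom 0 lista := rfl
  simp [h]
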